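-- pv_equiv track=rewrite | github.com/abhineetjain13/Crawlwise | backend/app/services/field_value_dom.py | _srcset_urls
-- ===== SOURCE A (Python) =====
-- def _srcset_urls(value: object) -> list[str]:
--     urls: list[str] = []
--     for part in str(value or "").split(","):
--         token = " ".join(str(part or "").split()).strip()
--         if not token:
--             continue
--         urls.append(token.split(" ", 1)[0].strip())
--     return [url for url in urls if url]
-- ===== SOURCE B (Python) =====
-- def _srcset_urls(value: object) -> list[str]:
--     # Single left-to-right character scan (state machine) instead of
--     # split-on-comma + whitespace-normalize + re-split per segment.
--     urls: list[str] = []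
--     cur: list[str] = []
--     taken = False  # first token of the current segment already emitted
--     for ch in str(value or "") + ",":
--         if ch == ",":
--             if cur and not taken:
--                 urls.append("".join(cur))
--             cur = []
--             taken = False
--         elif ch.isspace():
--             if cur:
--                 urls.append("".join(cur))
--                 cur = []
--                 taken = True
--         elif not taken:
--             cur.append(ch)
--     return urls
-- ===== Notes on version B (the rewrite author's own statement) =====
-- stated objective: alternative
-- what changed: Replaces A's split-on-comma loop (which whitespace-normalizes each segment by joining its split words, strips it, then re-splits to take the first token, plus a final filter) by a single left-to-right character scan with a small state machine that builds the current token and emits the first token of each comma segment directly.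
import Mathlib
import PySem

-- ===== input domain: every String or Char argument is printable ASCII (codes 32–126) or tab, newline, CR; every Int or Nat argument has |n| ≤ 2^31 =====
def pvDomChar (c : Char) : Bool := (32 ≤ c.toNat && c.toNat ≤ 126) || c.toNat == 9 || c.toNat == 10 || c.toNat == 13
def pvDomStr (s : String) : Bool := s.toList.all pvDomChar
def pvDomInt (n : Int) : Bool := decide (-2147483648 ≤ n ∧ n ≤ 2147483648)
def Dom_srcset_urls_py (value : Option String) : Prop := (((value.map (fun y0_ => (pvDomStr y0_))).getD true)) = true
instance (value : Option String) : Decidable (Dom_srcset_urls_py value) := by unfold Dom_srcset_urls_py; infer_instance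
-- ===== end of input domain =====

-- B replaces A's split-on-comma + whitespace-normalize + re-split pipeline by a single
-- left-to-right character state machine (alternative decomposition, same return value).


-- ===== PORT A =====
-- loop body of A: token = " ".join(str(part or "").split()).strip(); skip if empty;
-- append token.split(" ", 1)[0].strip().  ('part or ""' is the string itself; the [0]
-- never raises because split always returns a nonempty list, ported as .headD "")
def pvAPart (urls : List String) (part : String) : List String :=
  let token := PySem.Str.strip (PySem.Str.join " " (PySem.Str.split₀ part))
  if token = "" then urls
  else urls ++ [PySem.Str.strip (((PySem.Str.splitMax? token " " 1).getD []).headD "")]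

def srcset_urls_py (value : Option String) : List String :=
  let s := value.getD ""                                   -- str(value or "")
  let parts := (PySem.Str.split? s ",").getD []            -- s.split(",")  (sep ≠ "", always some)
  let urls := parts.foldl pvAPart []
  urls.filter (fun url => !(url == ""))                    -- [url for url in urls if url]

-- ===== PORT B =====
-- one step of B's character state machine; state = (urls, cur, taken)
def pvBStep (st : List String × List Char × Bool) (ch : Char) : List String × List Char × Bool :=
  let urls := st.1; let cur := st.2.1; let taken := st.2.2
  if ch = ',' then
    (if !cur.isEmpty && !taken then urls ++ [String.ofList cur] else urls, [], false)
  else if PySem.Chars.isspace ch then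
    if !cur.isEmpty then (urls ++ [String.ofList cur], [], true) else (urls, cur, taken)
  else if !taken then (urls, cur ++ [ch], taken)
  else (urls, cur, taken)

def srcset_urls_py_alt (value : Option String) : List String :=
  -- for ch in str(value or "") + ",":  (iterated char by char)
  (((value.getD "").toList ++ [',']).foldl pvBStep ([], [], false)).1

-- ===== PRECONDITION & SPEC =====
def Spec_srcset_urls_py (value : Option String) (out : List String) : Prop := out = srcset_urls_py_alt value
instance (value : Option String) (out : List String) : Decidable (Spec_srcset_urls_py value out) := by unfold Spec_srcset_urls_py; infer_instance

-- ===== CLAIM (what is proved, stated in full; the proofs are below) =====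
def Claim_equal_srcset_urls_py : Prop := ∀ (value : Option String), Dom_srcset_urls_py value → Spec_srcset_urls_py value (srcset_urls_py value)

-- ===== LEMMAS AND PROOFS =====

-- non-space character predicate
def pvNS (c : Char) : Bool := !(PySem.Chars.isspace c)

-- the whitespace-separated words of a character list (reference form of str.split())
def pvWords : List Char → List (List Char)
  | [] => []
  | c :: cs =>
    if PySem.Chars.isspace c then pvWords cs
    else (c :: cs.takeWhile pvNS) :: pvWords (cs.dropWhile pvNS)
termination_by cs => cs.length
decreasing_by
  · simp
  · have := List.length_dropWhile_le (p := pvNS) (l := cs); simp; omega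

-- the comma-separated segments of a character list (reference form of s.split(","))
def pvCsplit : List Char → List (List Char)
  | [] => [[]]
  | c :: cs =>
    if c = ',' then [] :: pvCsplit cs
    else match pvCsplit cs with
      | [] => [[c]]
      | s :: ss => (c :: s) :: ss

-- first word of a segment, as the emitted URL
def pvFW (seg : List Char) : Option String := (pvWords seg).head?.map String.ofList

-- the canonical value both ports are proved equal to
def pvCanon (cs : List Char) : List String := (pvCsplit cs).filterMap pvFW

theorem pvCsplit_ne_nil (cs : List Char) : pvCsplit cs ≠ [] := by
  cases cs with
  | nil => simp [pvCsplit]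
  | cons c cs =>
    simp only [pvCsplit]
    split
    · simp
    · split <;> simp


theorem pvCsplit_headI_tail (cs : List Char) :
    (pvCsplit cs).headI :: (pvCsplit cs).tail = pvCsplit cs := by
  rcases hx : pvCsplit cs with _ | ⟨s, ss⟩
  · exact absurd hx (pvCsplit_ne_nil cs)
  · simp

theorem pvTakeAll (l : List Char) (r : List Char) (h : ∀ c ∈ l, pvNS c = true) :
    (l ++ r).takeWhile pvNS = l ++ r.takeWhile pvNS := by
  induction l with
  | nil => simp
  | cons a l ih =>
    simp only [List.cons_append, List.takeWhile_cons, h a (by simp)]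
    rw [ih (fun c hc => h c (List.mem_cons_of_mem a hc))]
    simp

theorem pvDropAll (l : List Char) (r : List Char) (h : ∀ c ∈ l, pvNS c = true) :
    (l ++ r).dropWhile pvNS = r.dropWhile pvNS := by
  induction l with
  | nil => simp
  | cons a l ih =>
    simp only [List.cons_append, List.dropWhile_cons, h a (by simp)]
    exact ih (fun c hc => h c (List.mem_cons_of_mem a hc))

theorem pvLstrip_clean (a : Char) (ha : PySem.Chars.isspace a = false) (l : List Char) :
    PySem.Chars.lstrip (a :: l) = a :: l := by
  simp [PySem.Chars.lstrip, ha]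

theorem pvJoin_last (ws : List (List Char))
    (h : ∀ w ∈ ws, w ≠ [] ∧ ∀ c ∈ w, PySem.Chars.isspace c = false) (hne : ws ≠ []) :
    ∃ l d, PySem.Chars.join [' '] ws = l ++ [d] ∧ PySem.Chars.isspace d = false := by
  induction ws with
  | nil => exact absurd rfl hne
  | cons w ws ih =>
    cases ws with
    | nil =>
      rw [PySem.Chars.join_singleton]
      obtain ⟨hw, hc⟩ := h w (by simp)
      refine ⟨w.dropLast, w.getLast hw, ?_, hc _ (List.getLast_mem hw)⟩
      simp [List.dropLast_concat_getLast]
    | cons v vs =>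
      obtain ⟨l, d, hj, hd⟩ := ih (fun x hx => h x (List.mem_cons_of_mem w hx)) (by simp)
      rw [PySem.Chars.join_cons_cons, hj]
      exact ⟨w ++ [' '] ++ l, d, by simp, hd⟩

theorem pvSplitOn_go_comma (fuel : Nat) : ∀ (l cur : List Char) (acc : List (List Char)),
    l.length < fuel →
    PySem.Chars.splitOn.go [','] fuel l cur acc =
      acc.reverse ++ ((cur.reverse ++ (pvCsplit l).headI) :: (pvCsplit l).tail) := by
  induction fuel with
  | zero => intro l cur acc h; omega
  | succ f ih =>
    intro l cur acc h
    cases l with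
    | nil => rw [PySem.Chars.splitOn.go.eq_def]; cases f <;> simp [pvCsplit]
    | cons c rest =>
      by_cases hc : c = ','
      · subst hc
        rw [show PySem.Chars.splitOn.go [','] (f+1) (',' :: rest) cur acc
            = PySem.Chars.splitOn.go [','] f rest [] (cur.reverse :: acc) by
          rw [PySem.Chars.splitOn.go.eq_def]; simp [List.isPrefixOf]]
        rw [ih rest [] (cur.reverse :: acc) (by simpa using Nat.lt_of_succ_lt_succ h)]
        simp [pvCsplit, pvCsplit_headI_tail]
      · rw [show PySem.Chars.splitOn.go [','] (f+1) (c :: rest) cur acc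
            = PySem.Chars.splitOn.go [','] f rest (c :: cur) acc by
          rw [PySem.Chars.splitOn.go.eq_def]; simp [List.isPrefixOf, Ne.symm hc]]
        rw [ih rest (c :: cur) acc (by simpa using Nat.lt_of_succ_lt_succ h)]
        simp only [pvCsplit, if_neg hc]
        rcases hx : pvCsplit rest with _ | ⟨s, ss⟩
        · exact absurd hx (pvCsplit_ne_nil rest)
        · simp


theorem pvSplitOn_comma (cs : List Char) : PySem.Chars.splitOn cs [','] = pvCsplit cs := by
  unfold PySem.Chars.splitOn
  rw [pvSplitOn_go_comma (cs.length + 1) cs [] [] (by omega)]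
  rcases hx : pvCsplit cs with _ | ⟨s, ss⟩
  · exact absurd hx (pvCsplit_ne_nil cs)
  · simp


theorem pvSplit₀_go (l : List Char) : ∀ (cur : List Char) (acc : List (List Char)),
    PySem.Chars.split₀.go l cur acc =
      acc.reverse ++ (if cur.isEmpty then pvWords l
        else (cur.reverse ++ l.takeWhile pvNS) :: pvWords (l.dropWhile pvNS)) := by
  induction l with
  | nil =>
    intro cur acc
    rw [PySem.Chars.split₀.go.eq_def]
    cases cur <;> simp [pvWords]
  | cons c rest ih =>
    intro cur acc
    rw [PySem.Chars.split₀.go.eq_def]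
    by_cases hs : PySem.Chars.isspace c
    · simp only [hs, reduceIte]
      cases cur with
      | nil =>
        simp only [List.isEmpty_nil, reduceIte]
        rw [ih [] acc]
        simp [pvWords, hs]
      | cons a as =>
        simp only [List.isEmpty_cons, reduceIte, Bool.false_eq_true]
        rw [ih [] ((a :: as).reverse :: acc)]
        simp [pvWords, hs, List.takeWhile, List.dropWhile, pvNS]
    · simp only [hs, Bool.false_eq_true, reduceIte]
      rw [ih (c :: cur) acc]
      cases cur with
      | nil => simp [pvWords, hs]
      | cons a as => simp [hs, pvNS, List.takeWhile, List.dropWhile]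


theorem pvSplit₀_eq (cs : List Char) : PySem.Chars.split₀ cs = pvWords cs := by
  rw [PySem.Chars.split₀.eq_def, pvSplit₀_go]
  simp


theorem pvWords_sound (cs : List Char) :
    ∀ w ∈ pvWords cs, w ≠ [] ∧ ∀ c ∈ w, PySem.Chars.isspace c = false := by
  induction cs using pvWords.induct with
  | case1 => simp [pvWords]
  | case2 c cs hs ih => rw [pvWords, if_pos hs]; exact ih
  | case3 c cs hs ih =>
    rw [pvWords, if_neg hs]
    intro w hw
    rcases List.mem_cons.mp hw with rfl | hw
    · refine ⟨by simp, ?_⟩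
      intro d hd
      rcases List.mem_cons.mp hd with rfl | hd
      · simpa using hs
      · have := List.mem_takeWhile_imp hd
        simpa [pvNS] using this
    · exact ih w hw


-- words starting with an already-read non-space prefix
theorem pvWords_prefix (cur rest : List Char) (hne : cur ≠ [])
    (hns : ∀ c ∈ cur, PySem.Chars.isspace c = false) :
    pvWords (cur ++ rest) = (cur ++ rest.takeWhile pvNS) :: pvWords (rest.dropWhile pvNS) := by
  cases cur with
  | nil => exact absurd rfl hne
  | cons a as =>
    have ha : PySem.Chars.isspace a = false := hns a (by simp)
    have has : ∀ c ∈ as, pvNS c = true := by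
      intro c hc; simp [pvNS, hns c (List.mem_cons_of_mem a hc)]
    rw [List.cons_append, pvWords, if_neg (by simp [ha])]
    rw [pvTakeAll as rest has, pvDropAll as rest has]
    simp


theorem pvStrip_join (ws : List (List Char))
    (h : ∀ w ∈ ws, w ≠ [] ∧ ∀ c ∈ w, PySem.Chars.isspace c = false) :
    PySem.Chars.strip (PySem.Chars.join [' '] ws) = PySem.Chars.join [' '] ws := by
  cases ws with
  | nil => simp [PySem.Chars.join_nil, PySem.Chars.strip, PySem.Chars.lstrip, PySem.Chars.rstrip]
  | cons w ws =>
    obtain ⟨hw, hc⟩ := h w (by simp)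
    obtain ⟨a, w', rfl⟩ := List.exists_cons_of_ne_nil hw
    obtain ⟨l, d, hj, hd⟩ := pvJoin_last ((a :: w') :: ws) h (by simp)
    have hja : ∃ t, PySem.Chars.join [' '] ((a :: w') :: ws) = a :: t := by
      cases ws with
      | nil => exact ⟨w', by rw [PySem.Chars.join_singleton]⟩
      | cons v vs =>
        refine ⟨w' ++ ' ' :: PySem.Chars.join [' '] (v :: vs), ?_⟩
        rw [PySem.Chars.join_cons_cons]; simp
    obtain ⟨t, ht⟩ := hja
    unfold PySem.Chars.strip
    rw [ht, pvLstrip_clean a (hc a (by simp)) t, ← ht, hj]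
    unfold PySem.Chars.rstrip
    simp [hd]


theorem pvGoMax0 (fuel : Nat) (r : List Char) (acc : List (List Char)) :
    PySem.Chars.splitOnMax.go [' '] fuel 0 r [] acc = acc.reverse ++ [r] := by
  rw [PySem.Chars.splitOnMax.go.eq_def]
  cases fuel <;> cases r <;> simp


theorem pvGoMax1 (w : List Char) (hw : ∀ c ∈ w, PySem.Chars.isspace c = false) :
    ∀ (rest cur : List Char) (acc : List (List Char)) (fuel : Nat),
    (rest = [] ∨ ∃ r, rest = ' ' :: r) → (w ++ rest).length < fuel →
    PySem.Chars.splitOnMax.go [' '] fuel 1 (w ++ rest) cur acc =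
      acc.reverse ++ (cur.reverse ++ w) :: (if rest.isEmpty then [] else [rest.tail]) := by
  induction w with
  | nil =>
    intro rest cur acc fuel hrest hlen
    obtain ⟨f, rfl⟩ : ∃ f, fuel = f + 1 := ⟨fuel - 1, by omega⟩
    rcases hrest with rfl | ⟨r, rfl⟩
    · rw [PySem.Chars.splitOnMax.go.eq_def]; simp
    · rw [PySem.Chars.splitOnMax.go.eq_def]
      simp only [List.nil_append, List.isPrefixOf]
      simp [pvGoMax0]
  | cons a w ih =>
    intro rest cur acc fuel hrest hlen
    obtain ⟨f, rfl⟩ : ∃ f, fuel = f + 1 := ⟨fuel - 1, by omega⟩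
    have ha : PySem.Chars.isspace a = false := hw a (by simp)
    have ha' : ¬ (' ' == a) = true := by
      intro hx
      have : a = ' ' := ((beq_iff_eq).mp hx).symm
      subst this; rw [show PySem.Chars.isspace ' ' = true from by decide] at ha; exact absurd ha (by simp)
    rw [PySem.Chars.splitOnMax.go.eq_def]
    simp only [List.cons_append, List.isPrefixOf, ha', Bool.false_and]
    simp only [show ¬ (1 = 0) by omega, reduceIte, Bool.false_eq_true]
    rw [ih (fun c hc => hw c (List.mem_cons_of_mem a hc)) rest (a :: cur) acc f hrest
      (by simp at hlen ⊢; omega)]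
    simp


theorem pvDropSpaceFalse (l : List Char) (h : ∀ c ∈ l, PySem.Chars.isspace c = false) :
    l.dropWhile PySem.Chars.isspace = l := by
  cases l with
  | nil => simp
  | cons a l => simp [h a (by simp)]

theorem pvStrip_clean (w : List Char) (h : ∀ c ∈ w, PySem.Chars.isspace c = false) :
    PySem.Chars.strip w = w := by
  unfold PySem.Chars.strip PySem.Chars.lstrip PySem.Chars.rstrip
  rw [pvDropSpaceFalse w h, pvDropSpaceFalse w.reverse (fun c hc => h c (List.mem_reverse.mp hc))]
  simp

theorem pvOfList_ne_empty (w : List Char) (h : w ≠ []) : String.ofList w ≠ "" := by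
  intro hx
  have := congrArg String.toList hx
  simp [String.toList_ofList] at this
  exact h this

theorem pvJoin_shape (w : List Char) (ws : List (List Char)) :
    PySem.Chars.join [' '] (w :: ws) = w ++ (match ws with
      | [] => ([] : List Char)
      | _ :: _ => ' ' :: PySem.Chars.join [' '] ws) := by
  cases ws with
  | nil => simp [PySem.Chars.join_singleton]
  | cons v vs => rw [PySem.Chars.join_cons_cons]; simp

theorem pvAPart_eq (urls : List String) (seg : List Char) :
    pvAPart urls (String.ofList seg) = urls ++ (pvFW seg).toList := by
  have hws := pvWords_sound seg
  unfold pvAPart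
  have hsplit : PySem.Str.split₀ (String.ofList seg) = (pvWords seg).map String.ofList := by
    show ((PySem.Chars.split₀ (String.ofList seg).toList).map String.ofList) = _
    rw [String.toList_ofList, pvSplit₀_eq]
  rw [hsplit]
  have hjoin : PySem.Str.join " " ((pvWords seg).map String.ofList)
      = String.ofList (PySem.Chars.join [' '] (pvWords seg)) := by
    show String.ofList (PySem.Chars.join " ".toList (((pvWords seg).map String.ofList).map String.toList)) = _
    rw [List.map_map]
    simp [Function.comp_def, String.toList_ofList]
  rw [hjoin]
  have hstrip : PySem.Str.strip (String.ofList (PySem.Chars.join [' '] (pvWords seg)))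
      = String.ofList (PySem.Chars.join [' '] (pvWords seg)) := by
    show String.ofList (PySem.Chars.strip (String.ofList _).toList) = _
    rw [String.toList_ofList, pvStrip_join _ hws]
  rw [hstrip]
  rcases hW : pvWords seg with _ | ⟨w, ws'⟩
  · rw [if_pos (by simp [PySem.Chars.join_nil])]
    simp [pvFW, hW]
  · obtain ⟨hwne, hwclean⟩ := hws w (by rw [hW]; simp)
    have hjne : PySem.Chars.join [' '] (w :: ws') ≠ [] := by
      rw [pvJoin_shape]
      cases ws' <;> simp [hwne]
    rw [if_neg (pvOfList_ne_empty _ hjne)]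
    have hsm : PySem.Str.splitMax? (String.ofList (PySem.Chars.join [' '] (w :: ws'))) " " 1
        = some ((PySem.Chars.splitOnMax (PySem.Chars.join [' '] (w :: ws')) [' '] 1).map String.ofList) := by
      show Option.map _ (PySem.Chars.splitMax? (String.ofList _).toList " ".toList 1) = _
      rw [String.toList_ofList]
      simp [PySem.Chars.splitMax?]
    rw [hsm]
    have hmax : PySem.Chars.splitOnMax (PySem.Chars.join [' '] (w :: ws')) [' '] 1
        = w :: (match ws' with
            | [] => ([] : List (List Char))
            | _ :: _ => [PySem.Chars.join [' '] ws']) := by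
      unfold PySem.Chars.splitOnMax
      rw [if_neg (by omega)]
      rw [pvJoin_shape]
      cases ws' with
      | nil =>
        have := pvGoMax1 w hwclean [] [] [] ((w ++ ([] : List Char)).length + 1) (Or.inl rfl) (by omega)
        simpa using this
      | cons v vs =>
        have := pvGoMax1 w hwclean (' ' :: PySem.Chars.join [' '] (v :: vs)) [] []
          ((w ++ (' ' :: PySem.Chars.join [' '] (v :: vs))).length + 1)
          (Or.inr ⟨_, rfl⟩) (by simp)
        simp at this ⊢
        rw [this]
    rw [hmax]
    have hstripw : PySem.Str.strip (String.ofList w) = String.ofList w := by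
      show String.ofList (PySem.Chars.strip (String.ofList w).toList) = _
      rw [String.toList_ofList, pvStrip_clean w hwclean]
    cases ws' <;> simp [hstripw, pvFW, hW]

theorem pvAFold (segs : List (List Char)) : ∀ (acc : List String),
    (segs.map String.ofList).foldl pvAPart acc = acc ++ segs.filterMap pvFW := by
  induction segs with
  | nil => intro acc; simp
  | cons seg segs ih =>
    intro acc
    simp only [List.map_cons, List.foldl_cons, List.filterMap_cons]
    rw [pvAPart_eq, ih]
    rcases h : pvFW seg <;> simp

theorem pvCanon_ne_empty (cs : List Char) : ∀ u ∈ pvCanon cs, u ≠ "" := by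
  intro u hu
  obtain ⟨seg, _, hfw⟩ := List.mem_filterMap.mp hu
  obtain ⟨w, hw, rfl⟩ := Option.map_eq_some_iff.mp hfw
  have := (pvWords_sound seg w (List.mem_of_mem_head? hw)).1
  exact pvOfList_ne_empty w this

theorem pvFilter_id (l : List String) (h : ∀ u ∈ l, u ≠ "") :
    l.filter (fun url => !(url == "")) = l := by
  induction l with
  | nil => simp
  | cons a l ih =>
    rw [List.filter_cons, if_pos (by simpa using h a (by simp)), ih (fun u hu => h u (List.mem_cons_of_mem a hu))]

theorem pvA_eq_canon (value : Option String) :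
    srcset_urls_py value = pvCanon (value.getD "").toList := by
  simp only [srcset_urls_py]
  have hparts : (PySem.Str.split? (value.getD "") ",").getD []
      = (pvCsplit (value.getD "").toList).map String.ofList := by
    show ((PySem.Chars.split? (value.getD "").toList ",".toList).map (List.map String.ofList)).getD [] = _
    simp [PySem.Chars.split?]
    rw [pvSplitOn_comma]
  rw [hparts, pvAFold]
  exact pvFilter_id _ (pvCanon_ne_empty _)

theorem pvCsplit_cons_ne (c : Char) (l : List Char) (hc : c ≠ ',') :
    pvCsplit (c :: l) = (c :: (pvCsplit l).headI) :: (pvCsplit l).tail := by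
  simp only [pvCsplit, if_neg hc]
  rcases hx : pvCsplit l with _ | ⟨s, ss⟩
  · exact absurd hx (pvCsplit_ne_nil l)
  · simp

theorem pvFW_cons_space (c : Char) (x : List Char) (hc : PySem.Chars.isspace c = true) :
    pvFW (c :: x) = pvFW x := by
  unfold pvFW
  rw [pvWords, if_pos hc]

theorem pvFW_word (cur : List Char) (hne : cur ≠ [])
    (hns : ∀ c ∈ cur, PySem.Chars.isspace c = false) (rest : List Char) :
    (pvWords (cur ++ rest)).head? = some (cur ++ rest.takeWhile pvNS) := by
  rw [pvWords_prefix cur rest hne hns]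
  simp

theorem pvBLoop (l : List Char) : ∀ (urls : List String) (cur : List Char) (taken : Bool),
    (taken = true → cur = []) → (∀ c ∈ cur, PySem.Chars.isspace c = false ∧ c ≠ ',') →
    ((l ++ [',']).foldl pvBStep (urls, cur, taken)).1 =
      urls ++ (if taken then [] else (pvFW (cur ++ (pvCsplit l).headI)).toList)
           ++ ((pvCsplit l).tail.filterMap pvFW) := by
  induction l with
  | nil =>
    intro urls cur taken htk hcl
    have hcomma : PySem.Chars.isspace ',' = false := by decide
    simp only [List.nil_append, List.foldl_cons, List.foldl_nil, pvBStep, reduceIte, pvCsplit]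
    cases taken with
    | true =>
      rw [htk rfl]
      simp [pvFW]
    | false =>
      cases cur with
      | nil => simp [pvFW, pvWords]
      | cons a as =>
        have h1 := pvFW_word (a :: as) (by simp) (fun c hc => (hcl c hc).1) []
        simp only [List.append_nil] at h1
        simp [pvFW] at h1 ⊢
        simp [h1]
  | cons c l' ih =>
    intro urls cur taken htk hcl
    rw [List.cons_append, List.foldl_cons]
    by_cases hc : c = ','
    · subst hc
      have hstep : pvBStep (urls, cur, taken) ','
          = (if !cur.isEmpty && !taken then urls ++ [String.ofList cur] else urls, [], false) := by
        simp [pvBStep]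
      rw [hstep, ih _ [] false (by simp) (by simp)]
      rw [show pvCsplit (',' :: l') = [] :: pvCsplit l' from by simp [pvCsplit]]
      simp only [List.headI_cons, List.tail_cons]
      conv_rhs => rw [← pvCsplit_headI_tail l', List.filterMap_cons]
      have hurls : (if !cur.isEmpty && !taken then urls ++ [String.ofList cur] else urls)
          = urls ++ (if taken then [] else (pvFW (cur ++ [])).toList) := by
        cases taken with
        | true => rw [htk rfl]; simp
        | false =>
          cases cur with
          | nil => simp [pvFW, pvWords]
          | cons a as =>
            have h1 := pvFW_word (a :: as) (by simp) (fun x hx => (hcl x hx).1) []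
            simp only [List.append_nil] at h1
            simp [pvFW] at h1 ⊢
            simp [h1]
      rw [hurls]
      rcases hfw : pvFW ((pvCsplit l').headI) <;> simp [hfw, List.append_assoc]
    · rw [pvCsplit_cons_ne c l' hc]
      simp only [List.headI_cons, List.tail_cons]
      by_cases hs : PySem.Chars.isspace c = true
      · have hstep : pvBStep (urls, cur, taken) c
            = (if !cur.isEmpty then (urls ++ [String.ofList cur], ([] : List Char), true)
               else (urls, cur, taken)) := by
          simp [pvBStep, hc, hs]
        cases cur with
        | nil =>
          rw [hstep]
          simp only [List.isEmpty_nil, Bool.not_true, Bool.false_eq_true, reduceIte]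
          rw [ih urls [] taken htk (by simp)]
          rw [show ([] : List Char) ++ c :: (pvCsplit l').headI = c :: ((pvCsplit l').headI) from rfl]
          rw [pvFW_cons_space c _ hs]
          simp
        | cons a as =>
          have htk' : taken = false := by
            cases taken with
            | false => rfl
            | true => exact absurd (htk rfl) (by simp)
          subst htk'
          rw [hstep]
          simp only [List.isEmpty_cons, Bool.not_false, reduceIte]
          rw [ih _ [] true (fun _ => rfl) (by simp)]
          have h1 := pvFW_word (a :: as) (by simp) (fun x hx => (hcl x hx).1) (c :: (pvCsplit l').headI)
          have hpns : pvNS c = false := by simp [pvNS, hs]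
          simp only [List.takeWhile_cons, hpns, Bool.false_eq_true, reduceIte, List.append_nil] at h1
          simp only [pvFW, Bool.false_eq_true, reduceIte]
          rw [h1]
          simp
      · have hstep : pvBStep (urls, cur, taken) c
            = (if !taken then (urls, cur ++ [c], taken) else (urls, cur, taken)) := by
          simp [pvBStep, hc, hs]
        cases taken with
        | true =>
          rw [hstep]
          simp only [Bool.not_true, Bool.false_eq_true, reduceIte]
          rw [ih urls cur true htk hcl]
          simp
        | false =>
          rw [hstep]
          simp only [Bool.not_false, reduceIte]
          rw [ih urls (cur ++ [c]) false (by simp) ?hcl]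
          case hcl =>
            intro x hx
            rcases List.mem_append.mp hx with hx | hx
            · exact hcl x hx
            · simp at hx; subst hx
              exact ⟨by simpa using hs, hc⟩
          simp [List.append_assoc]

theorem pvB_eq_canon (value : Option String) :
    srcset_urls_py_alt value = pvCanon (value.getD "").toList := by
  unfold srcset_urls_py_alt
  rw [pvBLoop _ [] [] false (by simp) (by simp)]
  simp only [Bool.false_eq_true, reduceIte, List.nil_append]
  rw [show pvCanon (value.getD "").toList
      = ((pvCsplit (value.getD "").toList).headI :: (pvCsplit (value.getD "").toList).tail).filterMap pvFW by
    rw [pvCsplit_headI_tail]; rfl]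
  rw [List.filterMap_cons]
  rcases hfw : pvFW ((pvCsplit (value.getD "").toList).headI) <;> simp

-- ===== VERDICT (by name: the statement is the Claim_ definition above) =====
theorem srcset_urls_py_spec : Claim_equal_srcset_urls_py := by
  intro value _
  unfold Spec_srcset_urls_py
  rw [pvA_eq_canon, pvB_eq_canon]
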